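-- pv_equiv track=rewrite | github.com/talmiller2/portfolio_alert | portfolio_functions.py | complete_missing_keys
-- ===== SOURCE A (Python) =====
-- def complete_missing_keys(portfolio_new, portfolio_target_weights):
--     # add positions that exist (or not) in the current portfolio or target portfolio
--     for ticker in portfolio_target_weights.keys():
--         if ticker not in portfolio_new.keys():
--             portfolio_new[ticker] = 0
--     for ticker in portfolio_new.keys():
--         if ticker not in portfolio_target_weights.keys():
--             portfolio_target_weights[ticker] = 0
--     return portfolio_new, portfolio_target_weights
-- ===== SOURCE B (Python) =====
-- def complete_missing_keys(portfolio_new, portfolio_target_weights):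
--     # rebuild each dict from the ordered union of keys, reading values with .get
--     filled_new = {k: portfolio_new.get(k, 0)
--                   for k in dict.fromkeys(list(portfolio_new) + list(portfolio_target_weights))}
--     filled_target = {k: portfolio_target_weights.get(k, 0)
--                      for k in dict.fromkeys(list(portfolio_target_weights) + list(portfolio_new))}
--     portfolio_new.clear()
--     portfolio_new.update(filled_new)
--     portfolio_target_weights.clear()
--     portfolio_target_weights.update(filled_target)
--     return portfolio_new, portfolio_target_weights
-- ===== Notes on version B (the rewrite author's own statement) =====
-- stated objective: alternative
-- what changed: Instead of A's two in-place membership-guarded insertion loops, B rebuilds each dict from scratch: it deduplicates the concatenation of both key lists with dict.fromkeys to get the ordered key union and maps each key to its .get(k, 0) value, then writes the rebuilt dicts back into the arguments.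
import Mathlib
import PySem

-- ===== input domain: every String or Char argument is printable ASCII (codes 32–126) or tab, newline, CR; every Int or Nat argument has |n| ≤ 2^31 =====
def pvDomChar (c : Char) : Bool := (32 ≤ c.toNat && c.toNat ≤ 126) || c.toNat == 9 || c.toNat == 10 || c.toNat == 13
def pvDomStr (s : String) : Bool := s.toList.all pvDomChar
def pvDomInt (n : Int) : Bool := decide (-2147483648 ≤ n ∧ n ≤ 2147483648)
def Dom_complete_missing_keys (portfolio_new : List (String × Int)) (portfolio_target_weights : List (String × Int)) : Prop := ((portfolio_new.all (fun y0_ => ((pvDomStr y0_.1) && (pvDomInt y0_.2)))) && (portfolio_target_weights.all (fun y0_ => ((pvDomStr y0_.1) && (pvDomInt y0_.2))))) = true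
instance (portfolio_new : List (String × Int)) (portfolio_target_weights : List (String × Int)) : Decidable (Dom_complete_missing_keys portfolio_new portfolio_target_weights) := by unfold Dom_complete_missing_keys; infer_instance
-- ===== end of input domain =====

-- B rebuilds both dicts from scratch: ordered union of keys via dict.fromkeys, values via .get
-- (objective: simpler). Both Pythons mutate their dict arguments in place and leave them equal
-- to the returned dicts; the equivalence proved here is about the RETURN value.

-- ===== PORT A =====
-- for ticker in other.keys(): if ticker not in d.keys(): d[ticker] = 0   (two such loops)
def complete_missing_keys (portfolio_new : List (String × Int)) (portfolio_target_weights : List (String × Int)) : (List (String × Int)) × (List (String × Int)) :=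
  let portfolio_new2 :=
    (portfolio_target_weights.map Prod.fst).foldl
      (fun d ticker => if !((d.map Prod.fst).contains ticker) then d ++ [(ticker, 0)] else d)
      portfolio_new
  let portfolio_target_weights2 :=
    (portfolio_new2.map Prod.fst).foldl
      (fun d ticker => if !((d.map Prod.fst).contains ticker) then d ++ [(ticker, 0)] else d)
      portfolio_target_weights
  (portfolio_new2, portfolio_target_weights2)

-- ===== PORT B =====
-- dict.fromkeys(keys): first-occurrence deduplication, insertion order
def pvFromkeys (l : List String) : List String :=
  l.foldl (fun acc k => if acc.contains k then acc else acc ++ [k]) []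

-- d.get(k, 0) on an insertion-ordered association list (first match); exact for duplicate-free keys
def pvGet0 (d : List (String × Int)) (k : String) : Int :=
  match d.find? (fun p => p.1 == k) with
  | some p => p.2
  | none => 0

def complete_missing_keys_alt (portfolio_new : List (String × Int)) (portfolio_target_weights : List (String × Int)) : (List (String × Int)) × (List (String × Int)) :=
  let filled_new :=
    (pvFromkeys (portfolio_new.map Prod.fst ++ portfolio_target_weights.map Prod.fst)).map
      (fun k => (k, pvGet0 portfolio_new k))
  let filled_target :=
    (pvFromkeys (portfolio_target_weights.map Prod.fst ++ portfolio_new.map Prod.fst)).map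
      (fun k => (k, pvGet0 portfolio_target_weights k))
  (filled_new, filled_target)

-- ===== PRECONDITION & SPEC =====
-- Pre_ requires duplicate-free keys: a Python dict cannot contain duplicate keys, so
-- association lists with repeated keys represent no Python input at all.
def Pre_complete_missing_keys (portfolio_new : List (String × Int)) (portfolio_target_weights : List (String × Int)) : Prop :=
  (portfolio_new.map Prod.fst).Nodup ∧ (portfolio_target_weights.map Prod.fst).Nodup
instance (portfolio_new : List (String × Int)) (portfolio_target_weights : List (String × Int)) : Decidable (Pre_complete_missing_keys portfolio_new portfolio_target_weights) := by unfold Pre_complete_missing_keys; infer_instance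

def pvWitness_complete_missing_keys : (List (String × Int)) × (List (String × Int)) :=
  ([("AAPL", 3)], [("MSFT", 5)])

def Spec_complete_missing_keys (portfolio_new : List (String × Int)) (portfolio_target_weights : List (String × Int)) (out : (List (String × Int)) × (List (String × Int))) : Prop := out = complete_missing_keys_alt portfolio_new portfolio_target_weights
instance (portfolio_new : List (String × Int)) (portfolio_target_weights : List (String × Int)) (out : (List (String × Int)) × (List (String × Int))) : Decidable (Spec_complete_missing_keys portfolio_new portfolio_target_weights out) := by unfold Spec_complete_missing_keys; infer_instance

-- ===== CLAIM (what is proved, stated in full; the proofs are below) =====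
def Claim_equal_complete_missing_keys : Prop := ∀ (portfolio_new : List (String × Int)) (portfolio_target_weights : List (String × Int)), Dom_complete_missing_keys portfolio_new portfolio_target_weights → Pre_complete_missing_keys portfolio_new portfolio_target_weights → Spec_complete_missing_keys portfolio_new portfolio_target_weights (complete_missing_keys portfolio_new portfolio_target_weights)

-- ===== LEMMAS AND PROOFS =====

-- A's membership-guarded append loop, on a duplicate-free key list, is append-of-filtered-keys
lemma loopA_eq_filter (l : List String) (hl : l.Nodup) (d : List (String × Int)) :
    l.foldl (fun d ticker => if !((d.map Prod.fst).contains ticker) then d ++ [(ticker, 0)] else d) d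
      = d ++ (l.filter (fun k => !((d.map Prod.fst).contains k))).map (fun k => (k, (0 : Int))) := by
  induction l generalizing d with
  | nil => simp
  | cons a l ih =>
      obtain ⟨ha, hl'⟩ := List.nodup_cons.mp hl
      rw [List.foldl_cons, List.filter_cons]
      cases hc : (d.map Prod.fst).contains a
      · simp only [Bool.not_false, if_true]
        rw [ih hl' (d ++ [(a, 0)])]
        have hfc : (l.filter (fun k => !(((d ++ [(a, (0:Int))]).map Prod.fst).contains k)))
            = l.filter (fun k => !((d.map Prod.fst).contains k)) := by
          apply List.filter_congr
          intro x hx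
          have hxa : x ≠ a := fun h => ha (h ▸ hx)
          simp [hxa]
        rw [hfc]
        simp
      · simp only [Bool.not_true, Bool.false_eq_true, if_false]
        rw [ih hl' d]

-- dict.fromkeys fold, on a duplicate-free list, appends the not-yet-seen keys
lemma fromkeys_foldl_eq (l : List String) (hl : l.Nodup) (acc : List String) :
    l.foldl (fun acc k => if acc.contains k then acc else acc ++ [k]) acc
      = acc ++ l.filter (fun k => !acc.contains k) := by
  induction l generalizing acc with
  | nil => simp
  | cons a l ih =>
      obtain ⟨ha, hl'⟩ := List.nodup_cons.mp hl
      rw [List.foldl_cons, List.filter_cons]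
      cases hc : acc.contains a
      · simp only [Bool.not_false, Bool.false_eq_true, if_false, if_true]
        rw [ih hl' (acc ++ [a])]
        have hfc : l.filter (fun k => !((acc ++ [a]).contains k))
            = l.filter (fun k => !acc.contains k) := by
          apply List.filter_congr
          intro x hx
          have hxa : x ≠ a := fun h => ha (h ▸ hx)
          simp [hxa]
        rw [hfc]
        simp
      · simp only [Bool.not_true, Bool.false_eq_true, if_false, if_true]
        rw [ih hl' acc]

-- reading back each key of a duplicate-free association list reproduces it
lemma map_get_self (d : List (String × Int)) (hd : (d.map Prod.fst).Nodup) :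
    (d.map Prod.fst).map (fun k => (k, pvGet0 d k)) = d := by
  induction d with
  | nil => rfl
  | cons p d ih =>
      rw [List.map_cons] at hd
      obtain ⟨hp, hd'⟩ := List.nodup_cons.mp hd
      rw [List.map_cons, List.map_cons]
      have h2 : ∀ x ∈ d.map Prod.fst,
          (fun k => (k, pvGet0 (p :: d) k)) x = (fun k => (k, pvGet0 d k)) x := by
        intro x hx
        have hxp : (p.1 == x) = false :=
          beq_eq_false_iff_ne.mpr (fun h => hp (by rw [h]; exact hx))
        simp [pvGet0, hxp]
      rw [List.map_congr_left h2, ih hd']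
      have h1 : pvGet0 (p :: d) p.1 = p.2 := by simp [pvGet0]
      rw [h1]

lemma get_of_not_mem (d : List (String × Int)) (k : String)
    (h : ((d.map Prod.fst).contains k) = false) : pvGet0 d k = 0 := by
  have h' : k ∉ d.map Prod.fst := by simpa using h
  unfold pvGet0
  have hnone : d.find? (fun p => p.1 == k) = none := by
    rw [List.find?_eq_none]
    intro p hp hbeq
    exact h' ((by simpa using hbeq : p.1 = k) ▸ List.mem_map_of_mem hp)
  rw [hnone]

-- ===== VERDICT (by name: the statement is the Claim_ definition above) =====
theorem complete_missing_keys_spec : Claim_equal_complete_missing_keys := by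
  intro pn pt _ hpre
  obtain ⟨hn, ht⟩ := hpre
  unfold Spec_complete_missing_keys
  show complete_missing_keys pn pt = complete_missing_keys_alt pn pt
  have hE := loopA_eq_filter (pt.map Prod.fst) ht pn
  -- the keys A's first loop appends
  have hEkeys : ((((pt.map Prod.fst).filter (fun k => !((pn.map Prod.fst).contains k))).map
      (fun k => (k, (0:Int)))).map Prod.fst)
      = (pt.map Prod.fst).filter (fun k => !((pn.map Prod.fst).contains k)) := by
    simp [Function.comp_def]
  have hEnotin : ∀ x ∈ (pt.map Prod.fst).filter (fun k => !((pn.map Prod.fst).contains k)),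
      ((pn.map Prod.fst).contains x) = false := by
    intro x hx
    have := List.of_mem_filter hx
    simpa using this
  have hEint : ∀ x ∈ (pt.map Prod.fst).filter (fun k => !((pn.map Prod.fst).contains k)),
      x ∈ pt.map Prod.fst := fun x hx => List.mem_of_mem_filter hx
  have hnodup2 : ((pn.map Prod.fst) ++
      (pt.map Prod.fst).filter (fun k => !((pn.map Prod.fst).contains k))).Nodup := by
    refine List.Nodup.append hn (ht.filter _) ?_
    intro a ha hb
    have := hEnotin a hb
    simp only [List.contains_eq_mem, decide_eq_false_iff_not] at this
    exact this ha
  have hFnotin : ∀ x ∈ (pn.map Prod.fst).filter (fun k => !((pt.map Prod.fst).contains k)),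
      ((pt.map Prod.fst).contains x) = false := by
    intro x hx
    have := List.of_mem_filter hx
    simpa using this
  -- A, first component
  have hA1 : (complete_missing_keys pn pt).1
      = pn ++ ((pt.map Prod.fst).filter (fun k => !((pn.map Prod.fst).contains k))).map
          (fun k => (k, (0:Int))) := by
    simp only [complete_missing_keys]
    exact hE
  -- A, second component
  have hA2 : (complete_missing_keys pn pt).2
      = pt ++ ((pn.map Prod.fst).filter (fun k => !((pt.map Prod.fst).contains k))).map
          (fun k => (k, (0:Int))) := by
    simp only [complete_missing_keys]
    rw [hE, List.map_append, hEkeys]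
    rw [loopA_eq_filter _ hnodup2 pt, List.filter_append]
    have hnil : (((pt.map Prod.fst).filter (fun k => !((pn.map Prod.fst).contains k))).filter
        (fun k => !((pt.map Prod.fst).contains k))) = [] := by
      rw [List.filter_eq_nil_iff]
      intro x hx
      simpa using hEint x hx
    rw [hnil, List.append_nil]
  -- B, first component
  have hB1 : (complete_missing_keys_alt pn pt).1
      = pn ++ ((pt.map Prod.fst).filter (fun k => !((pn.map Prod.fst).contains k))).map
          (fun k => (k, (0:Int))) := by
    simp only [complete_missing_keys_alt, pvFromkeys]
    rw [List.foldl_append, fromkeys_foldl_eq _ hn [], List.nil_append]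
    have h0 : (pn.map Prod.fst).filter (fun k => !(([] : List String).contains k))
        = pn.map Prod.fst := by simp
    rw [h0, fromkeys_foldl_eq _ ht _, List.map_append, map_get_self pn hn]
    have hmc : ∀ x ∈ (pt.map Prod.fst).filter (fun k => !((pn.map Prod.fst).contains k)),
        (fun k => (k, pvGet0 pn k)) x = (fun k => (k, (0:Int))) x := by
      intro x hx
      simp [get_of_not_mem pn x (hEnotin x hx)]
    rw [List.map_congr_left hmc]
  -- B, second component
  have hB2 : (complete_missing_keys_alt pn pt).2
      = pt ++ ((pn.map Prod.fst).filter (fun k => !((pt.map Prod.fst).contains k))).map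
          (fun k => (k, (0:Int))) := by
    simp only [complete_missing_keys_alt, pvFromkeys]
    rw [List.foldl_append, fromkeys_foldl_eq _ ht [], List.nil_append]
    have h0 : (pt.map Prod.fst).filter (fun k => !(([] : List String).contains k))
        = pt.map Prod.fst := by simp
    rw [h0, fromkeys_foldl_eq _ hn _, List.map_append, map_get_self pt ht]
    have hmc : ∀ x ∈ (pn.map Prod.fst).filter (fun k => !((pt.map Prod.fst).contains k)),
        (fun k => (k, pvGet0 pt k)) x = (fun k => (k, (0:Int))) x := by
      intro x hx
      simp [get_of_not_mem pt x (hFnotin x hx)]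
    rw [List.map_congr_left hmc]
  exact Prod.ext (hA1.trans hB1.symm) (hA2.trans hB2.symm)
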